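-- pv_equiv track=rewrite | github.com/daniel-reich/turbo-robot | tftN3EdkSPfXxzWpi_14.py | sentence_searcher
-- ===== SOURCE A (Python) =====
-- def sentence_searcher(txt, n):
--   if n<0:
--     n = len(txt.split())+n
--   txt = [[i,len(i.split())] for i in txt.split('. ')]
--   start = 0
--   for a,b in txt:
--     if start<=n<start+b:
--       return a+'.' if a[-1]!='.' else a
--     else:
--       start+=b
-- ===== SOURCE B (Python) =====
-- def sentence_searcher(txt, n):
--     sentences = txt.split('. ')
--     if n < 0:
--         n = len(txt.split()) + n
--     # flat table: word position -> index of the sentence containing it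
--     index = [i for i, s in enumerate(sentences) for _ in s.split()]
--     if 0 <= n < len(index):
--         a = sentences[index[n]]
--         return a + '.' if a[-1] != '.' else a
-- ===== Notes on version B (the rewrite author's own statement) =====
-- stated objective: alternative
-- what changed: Replaces A's running-offset scan over (sentence, word-count) pairs by a precomputed flat word-position-to-sentence-index table built with enumerate, followed by a single bounds check and table lookup.
import Mathlib
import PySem

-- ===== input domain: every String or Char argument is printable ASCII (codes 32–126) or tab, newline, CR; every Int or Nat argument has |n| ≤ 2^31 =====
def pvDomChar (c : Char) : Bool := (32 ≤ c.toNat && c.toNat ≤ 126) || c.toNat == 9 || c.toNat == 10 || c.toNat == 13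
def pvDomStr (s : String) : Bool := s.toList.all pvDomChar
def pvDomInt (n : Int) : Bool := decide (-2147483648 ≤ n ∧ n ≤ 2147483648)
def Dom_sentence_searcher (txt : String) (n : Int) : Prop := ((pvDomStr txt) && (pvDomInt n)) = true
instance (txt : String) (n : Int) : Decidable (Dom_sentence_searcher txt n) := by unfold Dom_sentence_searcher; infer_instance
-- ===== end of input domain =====

-- B replaces A's running-offset scan by a precomputed word-position -> sentence-index table; same cost, different traversal.
-- On out-of-range n both Pythons return None (no str): excluded by Pre_; both ports render that fallthrough as "".

-- ===== PORT A =====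
-- the for-loop over [[sentence, word count]] pairs with the running offset `start`
def pvLoopA : List (List Char × Int) → Int → Int → List Char
  | [], _, _ => []  -- Python falls through and returns None here; [] renders it as ""
  | (a, b) :: rest, n, start =>
    if start ≤ n ∧ n < start + b then
      (if PySem.Chars.pyGet? a (-1) ≠ some '.' then a ++ ['.'] else a)
    else
      pvLoopA rest n (start + b)

def sentence_searcher (txt : String) (n : Int) : String :=
  let n' := if n < 0 then ((PySem.Chars.split₀ txt.toList).length : Int) + n else n
  let pairs := (PySem.Chars.splitOn txt.toList ['.', ' ']).map
      (fun i => (i, ((PySem.Chars.split₀ i).length : Int)))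
  String.ofList (pvLoopA pairs n' 0)

-- ===== PORT B =====
-- flat table: word position -> index of the sentence containing it
def pvIndexB (ss : List (List Char)) : List Int :=
  (PySem.List.enumerate ss).flatMap (fun p => (PySem.Chars.split₀ p.2).map (fun _ => p.1))

-- body of Source B's in-range branch: a = sentences[index[n]]; return a + '.' if a[-1] != '.' else a
def pvLookupB (ss : List (List Char)) (m : Int) : List Char :=
  match PySem.List.pyGet? (pvIndexB ss) m with
  | some i =>
    match PySem.List.pyGet? ss i with
    | some a => if PySem.Chars.pyGet? a (-1) ≠ some '.' then a ++ ['.'] else a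
    | none => []
  | none => []

def sentence_searcher_alt (txt : String) (n : Int) : String :=
  let ss := PySem.Chars.splitOn txt.toList ['.', ' ']
  let m := if n < 0 then ((PySem.Chars.split₀ txt.toList).length : Int) + n else n
  if 0 ≤ m ∧ m < ((pvIndexB ss).length : Int) then
    String.ofList (pvLookupB ss m)
  else
    ""  -- Python returns None here

-- ===== PRECONDITION & SPEC =====
-- Pre_ excludes exactly the inputs on which the (possibly normalized) word position n falls outside
-- the words of the '. '-split sentences: there A falls off its loop and returns None, not a str.
def Pre_sentence_searcher (txt : String) (n : Int) : Prop :=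
  let m := if n < 0 then ((PySem.Chars.split₀ txt.toList).length : Int) + n else n
  0 ≤ m ∧ m + 1 ≤ ((PySem.Chars.splitOn txt.toList ['.', ' ']).map
      (fun a => ((PySem.Chars.split₀ a).length : Int))).sum
instance (txt : String) (n : Int) : Decidable (Pre_sentence_searcher txt n) := by
  unfold Pre_sentence_searcher; infer_instance

def pvWitness_sentence_searcher : String × Int := ("Hi there. Bye", 2)

def Spec_sentence_searcher (txt : String) (n : Int) (out : String) : Prop := out = sentence_searcher_alt txt n
instance (txt : String) (n : Int) (out : String) : Decidable (Spec_sentence_searcher txt n out) := by unfold Spec_sentence_searcher; infer_instance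

-- ===== CLAIM (what is proved, stated in full; the proofs are below) =====
def Claim_equal_sentence_searcher : Prop := ∀ (txt : String) (n : Int), Dom_sentence_searcher txt n → Pre_sentence_searcher txt n → Spec_sentence_searcher txt n (sentence_searcher txt n)

-- ===== LEMMAS AND PROOFS =====

-- common recursive reference: walk the sentences, consuming the word position
def pvFind : List (List Char) → Int → List Char
  | [], _ => []
  | a :: ss, m =>
    if m < ((PySem.Chars.split₀ a).length : Int) then
      (if PySem.Chars.pyGet? a (-1) ≠ some '.' then a ++ ['.'] else a)
    else
      pvFind ss (m - ((PySem.Chars.split₀ a).length : Int))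

lemma pvLoopA_shift (ps : List (List Char × Int)) (n s : Int) :
    pvLoopA ps n s = pvLoopA ps (n - s) 0 := by
  induction ps generalizing n s with
  | nil => rfl
  | cons p rest ih =>
    obtain ⟨a, b⟩ := p
    simp only [pvLoopA]
    by_cases h : s ≤ n ∧ n < s + b
    · have h2 : 0 ≤ n - s ∧ n - s < 0 + b := by omega
      rw [if_pos h, if_pos h2]
    · have h2 : ¬(0 ≤ n - s ∧ n - s < 0 + b) := by omega
      rw [if_neg h, if_neg h2, ih n (s + b), ih (n - s) (0 + b)]
      rw [show n - s - (0 + b) = n - (s + b) by ring]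

lemma pvLoopA_eq_pvFind (ss : List (List Char)) (m : Int) (hm : 0 ≤ m) :
    pvLoopA (ss.map (fun i => (i, ((PySem.Chars.split₀ i).length : Int)))) m 0 = pvFind ss m := by
  induction ss generalizing m with
  | nil => rfl
  | cons a ss ih =>
    simp only [List.map_cons, pvLoopA, pvFind]
    by_cases h : m < ((PySem.Chars.split₀ a).length : Int)
    · rw [if_pos (by omega), if_pos h]
    · rw [if_neg (by omega), if_neg h, pvLoopA_shift,
        show m - (0 + ((PySem.Chars.split₀ a).length : Int)) = m - ((PySem.Chars.split₀ a).length : Int) by ring,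
        ih _ (by omega)]

-- the flat table at a shifted start index
def pvG (ss : List (List Char)) (s : Int) : List Int :=
  (PySem.List.enumerate ss s).flatMap (fun p => (PySem.Chars.split₀ p.2).map (fun _ => p.1))

lemma pvIndexB_eq_pvG (ss : List (List Char)) : pvIndexB ss = pvG ss 0 := rfl

lemma pvG_shift (ss : List (List Char)) (s : Int) :
    pvG ss (s + 1) = (pvG ss s).map (· + 1) := by
  induction ss generalizing s with
  | nil => rfl
  | cons a ss ih =>
    show (PySem.Chars.split₀ a).map (fun _ => s + 1) ++ pvG ss (s + 1 + 1)
        = ((PySem.Chars.split₀ a).map (fun _ => s) ++ pvG ss (s + 1)).map (· + 1)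
    rw [List.map_append, ih (s + 1)]
    congr 1
    simp

lemma pvG_length (ss : List (List Char)) (s : Int) :
    ((pvG ss s).length : Int) = (ss.map (fun a => ((PySem.Chars.split₀ a).length : Int))).sum := by
  induction ss generalizing s with
  | nil => rfl
  | cons a ss ih =>
    simp only [pvG, PySem.List.enumerate_cons, List.flatMap_cons, List.length_append,
      List.length_map, List.map_cons, List.sum_cons]
    push_cast
    rw [← ih (s + 1)]
    simp [pvG]

lemma pvG_mem_nonneg (ss : List (List Char)) (s : Int) (x : Int) (hx : x ∈ pvG ss s) : s ≤ x := by
  induction ss generalizing s with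
  | nil => simp [pvG] at hx
  | cons a ss ih =>
    simp only [pvG, PySem.List.enumerate_cons, List.flatMap_cons, List.mem_append,
      List.mem_map] at hx
    rcases hx with ⟨_, _, rfl⟩ | hx
    · omega
    · have := ih (s + 1) hx
      omega

lemma pvLookupB_eq_pvFind (ss : List (List Char)) (m : Int) (hm : 0 ≤ m)
    (hlt : m < ((ss.map (fun a => ((PySem.Chars.split₀ a).length : Int))).sum)) :
    pvLookupB ss m = pvFind ss m := by
  induction ss generalizing m with
  | nil =>
    exfalso
    simp at hlt
    omega
  | cons a ss ih =>
    have wa : (0:Int) ≤ ((PySem.Chars.split₀ a).length : Int) := by positivity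
    simp only [pvLookupB, pvIndexB_eq_pvG, pvFind]
    have hG : pvG (a :: ss) 0
        = (PySem.Chars.split₀ a).map (fun _ => (0:Int)) ++ (pvG ss 0).map (· + 1) := by
      rw [← pvG_shift ss 0]
      rfl
    by_cases h : m < ((PySem.Chars.split₀ a).length : Int)
    · rw [if_pos h, hG]
      have hget : PySem.List.pyGet?
          ((PySem.Chars.split₀ a).map (fun _ => (0:Int)) ++ (pvG ss 0).map (· + 1)) m
          = some 0 := by
        rw [PySem.List.pyGet?_of_nonneg _ hm]
        rw [List.getElem?_append_left (by simpa using by omega)]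
        rw [List.getElem?_map]
        have : m.toNat < (PySem.Chars.split₀ a).length := by omega
        simp [List.getElem?_eq_getElem this]
      rw [hget]
      simp
    · rw [if_neg h]
      have hlt' : m < ((PySem.Chars.split₀ a).length : Int)
          + ((ss.map (fun a => ((PySem.Chars.split₀ a).length : Int))).sum) := by
        rw [List.map_cons, List.sum_cons] at hlt
        exact hlt
      have hsum : m - ((PySem.Chars.split₀ a).length : Int)
          < ((ss.map (fun a => ((PySem.Chars.split₀ a).length : Int))).sum) := by omega
      have hm' : 0 ≤ m - ((PySem.Chars.split₀ a).length : Int) := by omega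
      have ihres := ih (m - ((PySem.Chars.split₀ a).length : Int)) hm' hsum
      simp only [pvLookupB, pvIndexB_eq_pvG] at ihres
      rw [hG]
      have hlen : ((PySem.Chars.split₀ a).map (fun _ => (0:Int))).length
          = ((PySem.Chars.split₀ a).length : Int).toNat := by
        simp
      have hget : PySem.List.pyGet?
          ((PySem.Chars.split₀ a).map (fun _ => (0:Int)) ++ (pvG ss 0).map (· + 1)) m
          = (PySem.List.pyGet? (pvG ss 0) (m - ((PySem.Chars.split₀ a).length : Int))).map (· + 1) := by
        rw [PySem.List.pyGet?_of_nonneg _ hm, PySem.List.pyGet?_of_nonneg _ hm']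
        rw [List.getElem?_append_right (by omega)]
        have hidx : m.toNat - ((PySem.Chars.split₀ a).length : Int).toNat
            = (m - ((PySem.Chars.split₀ a).length : Int)).toNat := by omega
        rw [hlen, List.getElem?_map, hidx]
      rw [hget]
      cases hg : PySem.List.pyGet? (pvG ss 0) (m - ((PySem.Chars.split₀ a).length : Int)) with
      | none =>
        rw [hg] at ihres
        simpa using ihres
      | some i =>
        have hi : 0 ≤ i := pvG_mem_nonneg ss 0 i (PySem.List.mem_of_pyGet?_eq_some _ hg)
        rw [hg] at ihres
        simp only [Option.map_some]
        have hcons : PySem.List.pyGet? (a :: ss) (i + 1) = PySem.List.pyGet? ss i := by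
          rw [show i = ((i.toNat : Nat) : Int) by omega]
          exact PySem.List.pyGet?_cons_succ ..
        rw [hcons]
        exact ihres

-- ===== VERDICT (by name: the statement is the Claim_ definition above) =====
theorem sentence_searcher_spec : Claim_equal_sentence_searcher := by
  intro txt n _ hpre
  unfold Spec_sentence_searcher sentence_searcher sentence_searcher_alt
  obtain ⟨hm0, hp1⟩ := hpre
  set m := if n < 0 then ((PySem.Chars.split₀ txt.toList).length : Int) + n else n with hmdef
  set ss := PySem.Chars.splitOn txt.toList ['.', ' '] with hss
  have hmlt : m < ((ss.map (fun a => ((PySem.Chars.split₀ a).length : Int))).sum) := by omega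
  have hguard : 0 ≤ m ∧ m < ((pvIndexB ss).length : Int) := by
    refine ⟨hm0, ?_⟩
    rw [pvIndexB_eq_pvG, pvG_length]
    exact hmlt
  rw [if_pos hguard]
  simp only []
  rw [pvLoopA_eq_pvFind ss m hm0, ← pvLookupB_eq_pvFind ss m hm0 hmlt]
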